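-- pv_equiv track=rewrite | github.com/appventuremoment/Codeforces | Unsolved 1954A/solve.py | checkColours
-- ===== SOURCE A (Python) =====
-- def checkColours(parts, colours, bob):
--     if parts == 1 or colours == 1:
--         return 'NO'
--     else:
--         ribcolours = {}
--         for colour in range(colours): ribcolours[colour] = parts // colours
--         for i in range(parts % colours): ribcolours[i] += 1
--         if sum(ribcolours.values()) - max(ribcolours.values()) <= bob: return 'NO'
--         else: return 'YES'
-- ===== SOURCE B (Python) =====
-- def checkColours(parts, colours, bob):
--     if parts == 1 or colours == 1:
--         return 'NO'
--     largest = -(-parts // colours)   # ceil(parts / colours): the biggest colour class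
--     return 'NO' if parts - largest <= bob else 'YES'
-- ===== Notes on version B (the rewrite author's own statement) =====
-- stated objective: faster
-- what changed: Replaces the O(colours) dict-building distribution loops with a closed-form ceiling-division formula for the largest colour class.
import Mathlib
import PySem

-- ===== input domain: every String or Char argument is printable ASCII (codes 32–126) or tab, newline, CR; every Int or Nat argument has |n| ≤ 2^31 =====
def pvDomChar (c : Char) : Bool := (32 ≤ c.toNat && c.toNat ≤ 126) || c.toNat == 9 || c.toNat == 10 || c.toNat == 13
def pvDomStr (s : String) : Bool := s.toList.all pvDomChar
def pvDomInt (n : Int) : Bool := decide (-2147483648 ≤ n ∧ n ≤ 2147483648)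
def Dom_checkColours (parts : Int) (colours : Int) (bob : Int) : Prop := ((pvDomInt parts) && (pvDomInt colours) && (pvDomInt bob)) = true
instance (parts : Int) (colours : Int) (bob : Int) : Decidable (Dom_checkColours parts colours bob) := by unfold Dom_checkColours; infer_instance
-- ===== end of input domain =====

-- B replaces A's O(colours) dict-building distribution loops with a closed-form
-- ceiling-division formula for the size of the largest colour class (objective: faster).

-- ===== PORT A =====
-- A's dict ribcolours is ported by hand as the array of its values: its keys are exactly
-- the fresh ascending ints 0, …, colours-1 inserted in that order, so in insertion order the
-- dict IS its value array with key = index; this representation is exact for every input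
-- admitted by Pre_ (for colours ≤ 0 with parts ≠ 1 the Python raises and Pre_ excludes it).

-- ribcolours = {}; for colour in range(colours): ribcolours[colour] = parts // colours
def ribInit (parts : Int) (colours : Int) : Array Int :=
  (PySem.List.pyRange 0 colours 1).foldl
    (fun d _colour => d.push (PySem.Int.floordiv parts colours)) #[]

-- for i in range(parts % colours): ribcolours[i] += 1
-- (exact: 0 ≤ i < parts % colours < colours, so key i is present and i.toNat is its index)
def ribFinal (parts : Int) (colours : Int) : Array Int :=
  (PySem.List.pyRange 0 (PySem.Int.mod parts colours) 1).foldl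
    (fun d i => d.set! i.toNat (d.getD i.toNat 0 + 1)) (ribInit parts colours)

def checkColours (parts : Int) (colours : Int) (bob : Int) : String :=
  if parts = 1 ∨ colours = 1 then "NO"
  else
    let vals := (ribFinal parts colours).toList   -- ribcolours.values()
    match PySem.List.max? vals (fun x => x) with
    | none => ""   -- Python: max([]) raises ValueError here (colours < 0); excluded by Pre_
    | some m =>
      if vals.foldl (· + ·) 0 - m ≤ bob then "NO" else "YES"   -- sum(...) - max(...) <= bob

-- ===== PORT B =====
def checkColours_alt (parts : Int) (colours : Int) (bob : Int) : String :=
  if parts = 1 ∨ colours = 1 then "NO"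
  else
    -- largest = -(-parts // colours)
    let largest := -(PySem.Int.floordiv (-parts) colours)
    if parts - largest ≤ bob then "NO" else "YES"

-- ===== PRECONDITION & SPEC =====
-- Pre_ excludes exactly the inputs where A raises: colours ≤ 0 with parts ≠ 1
-- (ZeroDivisionError at colours = 0, ValueError from max([]) at colours < 0).
def Pre_checkColours (parts : Int) (colours : Int) (bob : Int) : Prop :=
  parts = 1 ∨ 1 ≤ colours

instance (parts : Int) (colours : Int) (bob : Int) : Decidable (Pre_checkColours parts colours bob) := by
  unfold Pre_checkColours; infer_instance

def pvWitness_checkColours : Int × Int × Int := (7, 3, 2)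

def Spec_checkColours (parts : Int) (colours : Int) (bob : Int) (out : String) : Prop :=
  out = checkColours_alt parts colours bob

instance (parts : Int) (colours : Int) (bob : Int) (out : String) : Decidable (Spec_checkColours parts colours bob out) := by
  unfold Spec_checkColours; infer_instance

-- ===== CLAIM (what is proved, stated in full; the proofs are below) =====
def Claim_equal_checkColours : Prop :=
  ∀ (parts : Int) (colours : Int) (bob : Int), Dom_checkColours parts colours bob →
    Pre_checkColours parts colours bob →
    Spec_checkColours parts colours bob (checkColours parts colours bob)

-- ===== LEMMAS AND PROOFS =====

-- 0,1,...,n-1 as integers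
def natRange (n : Nat) : List Int := List.map (fun k => (Nat.cast k : Int)) (List.range n)

lemma natRange_nodup (n : Nat) : (natRange n).Nodup := by
  unfold natRange
  exact List.nodup_range.map (fun a b h => by exact_mod_cast h)

lemma pyRange_toNat (c : Int) (hc : 0 ≤ c) :
    PySem.List.pyRange 0 c 1 = natRange c.toNat := by
  obtain ⟨n, rfl⟩ : ∃ n : Nat, c = (n : Int) := ⟨c.toNat, by omega⟩
  rw [PySem.List.pyRange_zero_natCast]
  simp [natRange]

lemma mem_natRange {n : Nat} {x : Int} : x ∈ natRange n ↔ 0 ≤ x ∧ x < n := by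
  unfold natRange
  constructor
  · intro h
    rcases List.mem_map.mp h with ⟨j, hj, rfl⟩
    simp at hj; omega
  · rintro ⟨h0, hn⟩
    exact List.mem_map.mpr ⟨x.toNat, by simp; omega, by omega⟩

lemma natRange_length (n : Nat) : (natRange n).length = n := by
  simp [natRange]

lemma arr_getD_eq (a : Array Int) (k : Nat) : a.getD k 0 = a.toList.getD k 0 := by
  rw [List.getD_eq_getElem?_getD, Array.getElem?_toList]
  rcases Nat.lt_or_ge k a.size with h | h
  · rw [Array.getD, dif_pos h, Array.getElem?_eq_getElem h]; rfl
  · rw [Array.getD, dif_neg (by omega), Array.getElem?_eq_none (by omega)]; rfl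

-- the first loop pushes the same value once per key
lemma foldPush_toList (c : Int) (l : List Int) (arr : Array Int) :
    (l.foldl (fun d _ => d.push c) arr).toList = arr.toList ++ List.replicate l.length c := by
  induction l generalizing arr with
  | nil => simp
  | cons i t ih =>
      rw [List.foldl_cons, ih, Array.toList_push]
      simp only [List.length_cons, List.append_assoc, List.singleton_append]
      rw [← List.replicate_succ, List.replicate_succ']

lemma ribInit_toList (parts colours : Int) (hc : 0 < colours) :
    (ribInit parts colours).toList
      = List.replicate colours.toNat (PySem.Int.floordiv parts colours) := by
  unfold ribInit
  rw [pyRange_toNat colours (by omega), foldPush_toList, natRange_length]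
  rfl

-- the increment loop, moved from arrays to lists
lemma foldInc_toList (l : List Int) (arr : Array Int) :
    (l.foldl (fun d i => d.set! i.toNat (d.getD i.toNat 0 + 1)) arr).toList
      = l.foldl (fun L i => L.set i.toNat (L.getD i.toNat 0 + 1)) arr.toList := by
  induction l generalizing arr with
  | nil => rfl
  | cons i t ih =>
      rw [List.foldl_cons, List.foldl_cons, ih]
      congr 1
      rw [arr_getD_eq]
      simp [Array.set!]

lemma foldInc_length (l : List Int) (L : List Int) :
    (l.foldl (fun L i => L.set i.toNat (L.getD i.toNat 0 + 1)) L).length = L.length := by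
  induction l generalizing L with
  | nil => rfl
  | cons i t ih => rw [List.foldl_cons, ih, List.length_set]

-- each in-bounds key i gets +1 once per occurrence of i in the loop list
lemma foldInc_getD (l : List Int) (L : List Int) (j : Nat)
    (hb : ∀ i ∈ l, 0 ≤ i ∧ i.toNat < L.length) :
    (l.foldl (fun L i => L.set i.toNat (L.getD i.toNat 0 + 1)) L).getD j 0
      = L.getD j 0 + (l.count (j : Int) : Int) := by
  induction l generalizing L with
  | nil => simp
  | cons i t ih =>
      have hbi := hb i (by simp)
      rw [List.foldl_cons]
      rw [ih _ (fun x hx => by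
        have := hb x (by simp [hx])
        rwa [List.length_set])]
      rw [List.count_cons]
      by_cases hj : i.toNat = j
      · have hij : i = (j : Int) := by omega
        have hjlen : j < L.length := by omega
        have hset : (L.set i.toNat (L.getD i.toNat 0 + 1)).getD j 0 = L.getD j 0 + 1 := by
          rw [List.getD_eq_getElem?_getD, List.getElem?_set, if_pos hj, if_pos (by omega)]
          rw [hj, List.getD_eq_getElem?_getD]
          rw [List.getElem?_eq_getElem hjlen]
          rfl
        rw [hset]
        simp [hij]
        ring
      · have hij : i ≠ (j : Int) := by omega
        have hset : (L.set i.toNat (L.getD i.toNat 0 + 1)).getD j 0 = L.getD j 0 := by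
          rw [List.getD_eq_getElem?_getD, List.getElem?_set, if_neg hj,
              ← List.getD_eq_getElem?_getD]
        rw [hset]
        simp [hij]

lemma count_pyRange (r : Int) (hr : 0 ≤ r) (j : Nat) :
    ((PySem.List.pyRange 0 r 1).count (j : Int) : Int)
      = if (j : Int) < r then 1 else 0 := by
  rw [pyRange_toNat r hr]
  by_cases h : (j : Int) < r
  · rw [List.count_eq_one_of_mem (natRange_nodup r.toNat)
        (mem_natRange.mpr ⟨by omega, by omega⟩), if_pos h]
    rfl
  · rw [List.count_eq_zero_of_not_mem (fun hm => h (by have := mem_natRange.mp hm; omega)),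
        if_neg h]
    rfl

-- the final value list: parts//colours everywhere, +1 on the first parts%colours entries
lemma ribFinal_toList (parts colours : Int) (hc : 0 < colours) :
    (ribFinal parts colours).toList
      = (List.range colours.toNat).map
          (fun k => PySem.Int.floordiv parts colours
            + (if ((k : Nat) : Int) < PySem.Int.mod parts colours then 1 else 0)) := by
  have hr0 : 0 ≤ PySem.Int.mod parts colours := PySem.Int.mod_nonneg parts hc
  have hrc : PySem.Int.mod parts colours < colours := PySem.Int.mod_lt parts hc
  unfold ribFinal
  rw [foldInc_toList, ribInit_toList parts colours hc]
  have hb : ∀ i ∈ PySem.List.pyRange 0 (PySem.Int.mod parts colours) 1,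
      0 ≤ i ∧ i.toNat < (List.replicate colours.toNat (PySem.Int.floordiv parts colours)).length := by
    intro i hi
    have := PySem.List.mem_pyRange_one.mp hi
    rw [List.length_replicate]
    omega
  apply List.ext_getElem
  · rw [foldInc_length, List.length_replicate, List.length_map, List.length_range]
  · intro j h1 h2
    have hlen : j < colours.toNat := by
      rw [foldInc_length, List.length_replicate] at h1; exact h1
    rw [← List.getD_eq_getElem _ 0 h1, ← List.getD_eq_getElem _ 0 h2]
    rw [foldInc_getD _ _ j hb, count_pyRange _ hr0 j]
    rw [List.getD_replicate _ hlen]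
    rw [List.getD_eq_getElem?_getD, List.getElem?_map,
        List.getElem?_range hlen]
    rfl

lemma sum_distribution (q r : Int) (hr : 0 ≤ r) (n : Nat) :
    ((List.range n).map (fun k => q + (if ((k : Nat) : Int) < r then 1 else 0))).sum
      = n * q + min r n := by
  induction n with
  | zero => simp; omega
  | succ n ih =>
      rw [List.range_succ, List.map_append, List.sum_append, ih]
      simp only [List.map_cons, List.map_nil, List.sum_cons, List.sum_nil]
      by_cases h : (n : Int) < r
      · simp only [h, if_true]
        have hmin1 : min r (n : Int) = (n : Int) := by omega
        have hmin2 : min r ((n : Int) + 1) = (n : Int) + 1 := by omega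
        push_cast
        rw [hmin1, hmin2]; ring
      · simp only [h, if_false]
        have hmin1 : min r (n : Int) = r := by omega
        have hmin2 : min r ((n : Int) + 1) = r := by omega
        push_cast
        rw [hmin1, hmin2]; ring

-- ===== VERDICT (by name: the statement is the Claim_ definition above) =====
theorem checkColours_spec : Claim_equal_checkColours := by
  intro parts colours bob _ hpre
  unfold Spec_checkColours checkColours checkColours_alt
  by_cases h1 : parts = 1 ∨ colours = 1
  · simp [h1]
  · simp only [h1, if_false]
    have hc : 0 < colours := by
      rcases hpre with hp | hcc
      · exact absurd (Or.inl hp) h1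
      · rcases (not_or.mp h1) with ⟨_, hne1⟩
        omega
    obtain ⟨q, hq⟩ : ∃ q, PySem.Int.floordiv parts colours = q := ⟨_, rfl⟩
    obtain ⟨r, hr⟩ : ∃ r, PySem.Int.mod parts colours = r := ⟨_, rfl⟩
    have hr0 : 0 ≤ r := hr ▸ PySem.Int.mod_nonneg parts hc
    have hrc : r < colours := hr ▸ PySem.Int.mod_lt parts hc
    have hqr : q * colours + r = parts := by
      rw [← hq, ← hr]; exact PySem.Int.floordiv_mul_add_mod parts colours
    have hn : (colours.toNat : Int) = colours := by omega
    have hvals := ribFinal_toList parts colours hc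
    rw [hq, hr] at hvals
    rw [hvals]
    set V := (List.range colours.toNat).map
      (fun k => q + (if ((k : Nat) : Int) < r then 1 else 0)) with hV
    set c : Int := if 0 < r then 1 else 0 with hcdef
    have hc0 : 0 ≤ c ∧ c ≤ 1 ∧ (0 < r → c = 1) ∧ (r ≤ 0 → c = 0) := by
      rw [hcdef]; split <;> omega
    have hne : V ≠ [] := by
      rw [hV]
      simp only [ne_eq, List.map_eq_nil_iff, List.range_eq_nil]
      omega
    obtain ⟨m, hm⟩ : ∃ m, PySem.List.max? V (fun x => x) = some m := by
      cases hmx : PySem.List.max? V (fun x => x) with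
      | none => exact absurd ((PySem.List.max?_eq_none_iff _ _).mp hmx) hne
      | some m => exact ⟨m, rfl⟩
    rw [hm]
    -- the maximum value is q + c
    have hmval : m = q + c := by
      have hmem := PySem.List.max?_mem hm
      have hmax := PySem.List.max?_isMax hm
      have hle : m ≤ q + c := by
        rw [hV] at hmem
        rcases List.mem_map.mp hmem with ⟨j, _, hjm⟩
        by_cases hj : ((j : Nat) : Int) < r
        · have hrp : 0 < r := by omega
          simp only [hj, if_true] at hjm
          omega
        · simp only [hj, if_false] at hjm
          omega
      have hge : q + c ≤ m := by
        have h0mem : q + c ∈ V := by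
          rw [hV]
          apply List.mem_map.mpr
          refine ⟨0, List.mem_range.mpr (by omega), ?_⟩
          rw [hcdef]
          norm_num
        exact hmax _ h0mem
      omega
    -- the values sum to parts
    have hsum : V.foldl (· + ·) 0 = parts := by
      rw [← List.sum_eq_foldl, hV, sum_distribution q r hr0 colours.toNat, hn]
      have hmin : min r colours = r := by omega
      rw [hmin]
      linarith [hqr]
    -- B's closed-form largest class equals the same q + c
    have hlargest : -(PySem.Int.floordiv (-parts) colours) = q + c := by
      rw [PySem.Int.neg_floordiv_neg_eq_iff_of_pos hc]
      by_cases hrp : 0 < r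
      · rw [hc0.2.2.1 hrp]
        constructor
        · have he : (q + 1 - 1) * colours = q * colours := by ring
          rw [he]; linarith
        · have he : (q + 1) * colours = q * colours + colours := by ring
          rw [he]; linarith
      · have hr00 : r = 0 := by omega
        rw [hc0.2.2.2 (by omega)]
        constructor
        · have he : (q + 0 - 1) * colours = q * colours - colours := by ring
          rw [he]; linarith
        · have he : (q + 0) * colours = q * colours := by ring
          rw [he]; linarith
    rw [hsum, hmval, hlargest]
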